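-- pv_equiv track=rewrite | github.com/google/tock-on-titan | tools/print_memory_usage.py | compute_padding
-- ===== SOURCE A (Python) =====
-- def compute_padding(symbols):
--   func_count = len(symbols)
--   diff = 0
--   for i in range(1, func_count):
--     (esymbol, eaddr, esize, etotal) = symbols[i - 1]
--     (lsymbol, laddr, lsize, ltotal) = symbols[i]
--     total_size = laddr - eaddr
--     symbols[i - 1] = (esymbol, eaddr, esize, total_size)
--     if total_size != esize:
--       diff = diff + (total_size - esize)
--
--   return diff
-- ===== SOURCE B (Python) =====
-- # B: closed form instead of the accumulation loop. Return-value equivalent to A;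
-- # unlike A, B does NOT mutate `symbols` (A rewrites each entry's total field in place).
-- def compute_padding(symbols):
--   if len(symbols) < 2:
--     return 0
--   return symbols[-1][1] - symbols[0][1] - sum(s[2] for s in symbols[:-1])
-- ===== Notes on version B (the rewrite author's own statement) =====
-- stated objective: simpler
-- what changed: Replaced the index loop that accumulates per-gap differences with a telescoped closed form: last address minus first address minus the sum of all but the last size (B does not perform A's in-place rewrite of the totals; return values are identical).
import Mathlib
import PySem

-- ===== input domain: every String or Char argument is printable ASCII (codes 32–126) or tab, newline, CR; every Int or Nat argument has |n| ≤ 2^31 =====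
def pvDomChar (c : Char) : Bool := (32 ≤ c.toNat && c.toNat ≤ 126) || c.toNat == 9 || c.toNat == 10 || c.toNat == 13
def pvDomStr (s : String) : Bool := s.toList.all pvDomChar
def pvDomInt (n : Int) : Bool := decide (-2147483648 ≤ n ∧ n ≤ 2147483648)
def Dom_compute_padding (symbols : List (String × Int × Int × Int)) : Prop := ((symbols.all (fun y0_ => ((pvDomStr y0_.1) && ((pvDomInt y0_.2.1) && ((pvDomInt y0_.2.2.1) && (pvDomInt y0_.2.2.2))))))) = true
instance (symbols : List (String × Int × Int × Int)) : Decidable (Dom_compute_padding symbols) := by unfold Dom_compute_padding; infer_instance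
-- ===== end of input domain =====

-- B replaces A's accumulation loop by the telescoped closed form (last addr - first addr - sum of
-- all-but-last sizes); equivalence is about the RETURN value only: A also rewrites the totals of
-- `symbols` in place, B does not mutate its argument.


-- ===== PORT A =====
-- default tuple used only to make the (always in-range) index reads total
def padDefault : String × Int × Int × Int := ("", 0, 0, 0)

-- one iteration of A's `for i in range(1, func_count)` body over state (symbols, diff)
def padStep (st : List (String × Int × Int × Int) × Int) (i : Int) :
    List (String × Int × Int × Int) × Int :=
  let e := PySem.List.pyGetD st.1 (i - 1) padDefault   -- symbols[i-1]
  let l := PySem.List.pyGetD st.1 i padDefault         -- symbols[i]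
  let total := l.2.1 - e.2.1
  let syms := PySem.List.pySetD st.1 (i - 1) (e.1, e.2.1, e.2.2.1, total)
  (syms, if total ≠ e.2.2.1 then st.2 + (total - e.2.2.1) else st.2)

def compute_padding (symbols : List (String × Int × Int × Int)) : Int :=
  ((PySem.List.pyRange 1 (symbols.length : Int) 1).foldl padStep (symbols, 0)).2

-- ===== PORT B =====
def compute_padding_alt (symbols : List (String × Int × Int × Int)) : Int :=
  if symbols.length < 2 then 0
  else
    (PySem.List.pyGetD symbols (-1) padDefault).2.1
      - (PySem.List.pyGetD symbols 0 padDefault).2.1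
      - ((PySem.List.slice symbols none (some (-1))).map (fun s => s.2.2.1)).sum

-- ===== PRECONDITION & SPEC =====
def Spec_compute_padding (symbols : List (String × Int × Int × Int)) (out : Int) : Prop := out = compute_padding_alt symbols
instance (symbols : List (String × Int × Int × Int)) (out : Int) : Decidable (Spec_compute_padding symbols out) := by unfold Spec_compute_padding; infer_instance

-- ===== CLAIM (what is proved, stated in full; the proofs are below) =====
def Claim_equal_compute_padding : Prop := ∀ (symbols : List (String × Int × Int × Int)), Dom_compute_padding symbols → Spec_compute_padding symbols (compute_padding symbols)

-- ===== LEMMAS AND PROOFS =====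

-- Invariant of A's loop after processing range(1, n): the list is untouched from index n-1 on,
-- length is preserved, and diff equals the telescoped closed form for the first n entries.
lemma pad_loop (symbols : List (String × Int × Int × Int)) (n : Nat)
    (h1 : 1 ≤ n) (hn : n ≤ symbols.length) :
    ((PySem.List.pyRange 1 (n : Int) 1).foldl padStep (symbols, 0)).1.length = symbols.length ∧
    (∀ j : Nat, n - 1 ≤ j →
      ((PySem.List.pyRange 1 (n : Int) 1).foldl padStep (symbols, 0)).1[j]? = symbols[j]?) ∧
    ((PySem.List.pyRange 1 (n : Int) 1).foldl padStep (symbols, 0)).2 =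
      (symbols.getD (n - 1) padDefault).2.1 - (symbols.getD 0 padDefault).2.1
        - ((symbols.take (n - 1)).map (fun s => s.2.2.1)).sum := by
  induction n with
  | zero => omega
  | succ n ih =>
    rcases Nat.lt_or_ge n 1 with hn1 | hn1
    · -- n = 0 : range 1 1 = []
      interval_cases n
      simp [PySem.List.pyRange_one_eq_nil]
    · -- n ≥ 1
      have hsplit : PySem.List.pyRange 1 ((n : Int) + 1) 1
          = PySem.List.pyRange 1 (n : Int) 1 ++ [(n : Int)] :=
        PySem.List.pyRange_one_succ_right (by exact_mod_cast hn1)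
      obtain ⟨ihlen, ihagree, ihdiff⟩ := ih hn1 (by omega)
      set st := (PySem.List.pyRange 1 (n : Int) 1).foldl padStep (symbols, 0) with hst
      rw [show (((n : Nat) + 1 : Nat) : Int) = (n : Int) + 1 by push_cast; ring, hsplit,
          List.foldl_append, ← hst]
      -- the reads in the final step see the original list
      have hnm1 : ((n : Int) - 1) = ((n - 1 : Nat) : Int) := by omega
      have hgetE : PySem.List.pyGetD st.1 ((n : Int) - 1) padDefault
          = symbols.getD (n - 1) padDefault := by
        rw [hnm1, PySem.List.pyGetD_natCast, List.getD_eq_getElem?_getD,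
            List.getD_eq_getElem?_getD, ihagree (n - 1) (le_refl _)]
      have hgetL : PySem.List.pyGetD st.1 ((n : Int)) padDefault
          = symbols.getD n padDefault := by
        rw [show ((n : Int)) = ((n : Nat) : Int) from rfl, PySem.List.pyGetD_natCast,
            List.getD_eq_getElem?_getD, List.getD_eq_getElem?_getD, ihagree n (by omega)]
      have hset : ∀ v, PySem.List.pySetD st.1 ((n : Int) - 1) v = st.1.set (n - 1) v := by
        intro v; rw [hnm1, PySem.List.pySetD_natCast]
      refine ⟨?_, ?_, ?_⟩
      · simp only [List.foldl_cons, List.foldl_nil, padStep, hset]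
        simpa using ihlen
      · intro j hj
        simp only [List.foldl_cons, List.foldl_nil, padStep, hset]
        rw [List.getElem?_set_ne (by omega)]
        exact ihagree j (by omega)
      · simp only [List.foldl_cons, List.foldl_nil, padStep, hset, hgetE, hgetL]
        have hterm : ((symbols.take n).map (fun s => s.2.2.1)).sum
            = ((symbols.take (n - 1)).map (fun s => s.2.2.1)).sum
              + (symbols.getD (n - 1) padDefault).2.2.1 := by
          obtain ⟨m, rfl⟩ : ∃ m, n = m + 1 := ⟨n - 1, by omega⟩
          have h1' : m < symbols.length := by omega
          have hm : m < (symbols.map (fun s => s.2.2.1)).length := by simpa using h1'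
          simp only [Nat.add_sub_cancel, List.map_take]
          rw [List.getD_eq_getElem symbols padDefault h1', List.sum_take_succ _ _ hm,
              List.getElem_map]
        simp only [Nat.add_sub_cancel]
        rw [hterm, ihdiff]
        split_ifs with h
        · ring
        · omega

-- ===== VERDICT (by name: the statement is the Claim_ definition above) =====
theorem compute_padding_spec : Claim_equal_compute_padding := by
  intro symbols _
  unfold Spec_compute_padding compute_padding compute_padding_alt
  rcases Nat.lt_or_ge symbols.length 2 with hlt | hge
  · -- 0 or 1 symbols: A's range is empty, B returns 0
    rw [if_pos hlt, PySem.List.pyRange_one_eq_nil (by omega)]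
    rfl
  · rw [if_neg (by omega)]
    have hne : symbols ≠ [] := by
      intro h; rw [h] at hge; simp at hge
    obtain ⟨_, _, hdiff⟩ := pad_loop symbols symbols.length (by omega) le_rfl
    have hx : symbols.getD (symbols.length - 1) padDefault = symbols[symbols.length - 1]'(by omega) :=
      List.getD_eq_getElem symbols padDefault (by omega)
    rw [hdiff, PySem.List.pyGetD_neg_one symbols padDefault hne,
        PySem.List.slice_to_neg_one,
        List.getLast_eq_getElem, PySem.List.pyGetD_zero, List.dropLast_eq_take, hx]
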